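-- pv_equiv track=rewrite | github.com/Lowz13/Algoritmos | Clases/descifra.py | leer_palabra_repetida
-- ===== SOURCE A (Python) =====
-- def leer_palabra_repetida(palabra):
--     """Encuentra las posiciones de letras repetidas en una palabra."""
--     repetidos = []
--     letras_vistas = set()
--
--     for letra in palabra:
--         if palabra.count(letra) > 1 and letra not in letras_vistas:
--             posiciones = [i for i, char in enumerate(palabra) if char == letra]
--             repetidos.append(posiciones)
--             letras_vistas.add(letra)
--
--     return repetidos, len(repetidos) # Devuelve también el conteo de letras repetidas
-- ===== SOURCE B (Python) =====
-- def leer_palabra_repetida(palabra):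
--     """Encuentra las posiciones de letras repetidas en una palabra."""
--     # pass 1: frequency table
--     cuentas = {}
--     for letra in palabra:
--         cuentas[letra] = cuentas.get(letra, 0) + 1
--     # pass 2: positions of every letter, grouped in first-occurrence order
--     posiciones = {}
--     for i, letra in enumerate(palabra):
--         posiciones.setdefault(letra, []).append(i)
--     # keep only the letters that occur more than once
--     repetidos = [pos for letra, pos in posiciones.items() if cuentas[letra] > 1]
--     return repetidos, len(repetidos)
-- ===== Notes on version B (the rewrite author's own statement) =====
-- stated objective: faster
-- what changed: A rescans the whole word inside its loop (str.count plus a full enumerate comprehension per letter); B makes one pass building a frequency table, one grouping pass over enumerate collecting each index under its letter in an insertion-ordered dict, and then filters the grouped items by the tabulated count.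
import Mathlib
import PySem

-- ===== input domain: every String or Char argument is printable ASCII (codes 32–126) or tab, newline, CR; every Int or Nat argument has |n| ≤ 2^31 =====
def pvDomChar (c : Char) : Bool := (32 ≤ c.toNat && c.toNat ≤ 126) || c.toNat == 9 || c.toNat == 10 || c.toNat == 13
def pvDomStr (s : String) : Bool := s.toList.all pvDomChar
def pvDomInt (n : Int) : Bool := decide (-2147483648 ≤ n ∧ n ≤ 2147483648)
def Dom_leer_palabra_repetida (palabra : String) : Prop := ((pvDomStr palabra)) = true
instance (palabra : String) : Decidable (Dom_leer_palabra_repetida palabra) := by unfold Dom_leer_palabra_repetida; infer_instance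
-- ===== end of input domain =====

-- B replaces A's per-letter full-word rescans (count + positions comprehension inside the loop)
-- by two linear passes — a frequency table, then one grouping pass over enumerate — plus a
-- filter over the grouped dict.

-- ===== PORT A =====
def leer_palabra_repetida (palabra : String) : List (List Int) × Int :=
  let cs := palabra.toList
  -- repetidos = []; letras_vistas = set(); for letra in palabra: …
  let st := cs.foldl (fun (acc : List (List Int) × PySem.Set Char) letra =>
      if PySem.Chars.count cs [letra] > 1 ∧ letra ∉ acc.2 then
        -- posiciones = [i for i, char in enumerate(palabra) if char == letra]
        let posiciones := ((PySem.List.enumerate cs).filter (fun p => p.2 == letra)).map (fun p => p.1)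
        (acc.1 ++ [posiciones], PySem.Set.add acc.2 letra)
      else acc)
    ([], PySem.Set.empty)
  (st.1, (st.1.length : Int))

-- ===== PORT B =====
def leer_palabra_repetida_alt (palabra : String) : List (List Int) × Int :=
  let cs := palabra.toList
  -- pass 1: cuentas[letra] = cuentas.get(letra, 0) + 1
  let cuentas : PySem.Dict Char Int :=
    cs.foldl (fun d letra => d.insert letra (d.getD letra 0 + 1)) PySem.Dict.empty
  -- pass 2: posiciones.setdefault(letra, []).append(i)  ==  posiciones[letra] = posiciones.get(letra, []) + [i]
  let posiciones : PySem.Dict Char (List Int) :=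
    (PySem.List.enumerate cs).foldl (fun d p => d.modify p.2 [] (fun v => v ++ [p.1])) PySem.Dict.empty
  -- [pos for letra, pos in posiciones.items() if cuentas[letra] > 1]
  -- (cuentas[letra] cannot raise: letra is always a key of cuentas here, so getD _ 0 is exact)
  let repetidos := (posiciones.items.filter (fun kv => cuentas.getD kv.1 0 > 1)).map (fun kv => kv.2)
  (repetidos, (repetidos.length : Int))

-- ===== PRECONDITION & SPEC =====
def Spec_leer_palabra_repetida (palabra : String) (out : List (List Int) × Int) : Prop := out = leer_palabra_repetida_alt palabra
instance (palabra : String) (out : List (List Int) × Int) : Decidable (Spec_leer_palabra_repetida palabra out) := by unfold Spec_leer_palabra_repetida; infer_instance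

-- ===== CLAIM (what is proved, stated in full; the proofs are below) =====
def Claim_equal_leer_palabra_repetida : Prop := ∀ (palabra : String), Dom_leer_palabra_repetida palabra → Spec_leer_palabra_repetida palabra (leer_palabra_repetida palabra)

-- ===== LEMMAS AND PROOFS =====

-- str.count with a one-character needle counts exactly the equal characters
theorem pv_count_go_single (c : Char) : ∀ (l : List Char) (fuel acc : Nat), l.length ≤ fuel →
    PySem.Chars.count.go [c] fuel l acc = acc + l.count c := by
  intro l
  induction l with
  | nil => intro fuel acc _; cases fuel <;> simp [PySem.Chars.count.go]
  | cons h t ih =>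
    intro fuel acc hf
    cases fuel with
    | zero => simp at hf
    | succ f =>
      rw [PySem.Chars.count.go]
      simp only [List.isPrefixOf, List.length_cons] at hf ⊢
      by_cases hc : c = h
      · subst hc
        simp only [BEq.rfl, Bool.true_and, if_pos]
        simp only [List.length_nil, Nat.zero_add, List.drop_succ_cons, List.drop_zero]
        rw [ih f (acc + 1) (by omega)]
        simp
        omega
      · have hb : (c == h) = false := by simp [hc]
        simp only [hb, Bool.false_and, if_neg Bool.false_ne_true]
        rw [ih f acc (by omega)]
        simp [Ne.symm hc]

theorem pv_count_singleton (cs : List Char) (c : Char) :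
    PySem.Chars.count cs [c] = cs.count c := by
  rw [PySem.Chars.count]
  simp [pv_count_go_single c cs cs.length 0 le_rfl]

-- the positions list both programs produce for a letter
def pvPos (cs : List Char) (c : Char) : List Int :=
  ((PySem.List.enumerate cs).filter (fun p => p.2 == c)).map (fun p => p.1)

-- Set.update only appends
theorem pv_update_prefix {α : Type} [BEq α] : ∀ (l : List α) (S : PySem.Set α),
    S <+: PySem.Set.update S l := by
  intro l
  induction l with
  | nil => intro S; simp [PySem.Set.update]
  | cons x t ih =>
    intro S
    have h1 : S <+: PySem.Set.add S x := by
      unfold PySem.Set.add; split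
      · exact List.prefix_refl S
      · exact List.prefix_append S [x]
    have h2 : PySem.Set.update S (x :: t) = PySem.Set.update (PySem.Set.add S x) t := by
      simp [PySem.Set.update]
    rw [h2]; exact h1.trans (ih _)

theorem pv_add_mem (S : PySem.Set Char) (c : Char) (hm : c ∈ S) : PySem.Set.add S c = S := by
  unfold PySem.Set.add PySem.Set.contains; simp [hm]

theorem pv_add_not_mem (S : PySem.Set Char) (c : Char) (hm : c ∉ S) : PySem.Set.add S c = S ++ [c] := by
  unfold PySem.Set.add PySem.Set.contains; simp [hm]

theorem pv_ofList_snoc (P : List Char) (c : Char) :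
    PySem.Set.ofList (P ++ [c]) = PySem.Set.add (PySem.Set.ofList P) c := by
  rw [PySem.Set.ofList_eq_foldl, PySem.Set.ofList_eq_foldl, List.foldl_append]; rfl

theorem pv_update_cons (S : PySem.Set Char) (c : Char) (t : List Char) :
    PySem.Set.update S (c :: t) = PySem.Set.update (PySem.Set.add S c) t := by
  simp [PySem.Set.update]

theorem pv_update_drop (S : List Char) (c : Char) (t : List Char) :
    (PySem.Set.update (S ++ [c]) t).drop S.length
      = c :: (PySem.Set.update (S ++ [c]) t).drop (S.length + 1) := by
  obtain ⟨r, hr⟩ := pv_update_prefix t (S ++ [c])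
  rw [← hr, List.append_assoc]
  rw [List.drop_left]
  have hl : S.length + 1 = (S ++ [c]).length := by simp
  rw [hl, ← List.append_assoc, List.drop_left]
  rfl

-- the A loop, characterised: starting after a processed prefix P (seen set = its repeated letters),
-- it appends the positions lists of the new repeated letters in first-occurrence order
theorem pv_A_loop (cs : List Char) : ∀ (l : List Char) (R : List (List Int)) (P : List Char),
    (l.foldl (fun (acc : List (List Int) × PySem.Set Char) letra =>
        if PySem.Chars.count cs [letra] > 1 ∧ letra ∉ acc.2 then
          (acc.1 ++ [((PySem.List.enumerate cs).filter (fun p => p.2 == letra)).map (fun p => p.1)],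
           PySem.Set.add acc.2 letra)
        else acc)
      (R, (PySem.Set.ofList P).filter (fun c => decide (PySem.Chars.count cs [c] > 1)))).1
    = R ++ (((PySem.Set.update (PySem.Set.ofList P) l).drop (PySem.Set.ofList P).length).filter
          (fun c => decide (PySem.Chars.count cs [c] > 1))).map (pvPos cs) := by
  intro l
  induction l with
  | nil =>
    intro R P
    simp [PySem.Set.update]
  | cons c t ih =>
    intro R P
    rw [List.foldl_cons, pv_update_cons]
    by_cases hm : c ∈ PySem.Set.ofList P
    · rw [pv_add_mem _ _ hm]
      by_cases hp : PySem.Chars.count cs [c] > 1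
      · rw [if_neg (by simp [List.mem_filter, hm, hp])]
        exact ih R P
      · rw [if_neg (by simp [hp])]
        exact ih R P
    · have hnm : c ∉ (PySem.Set.ofList P).filter (fun c => decide (PySem.Chars.count cs [c] > 1)) := by
        simp [List.mem_filter, hm]
      by_cases hp : PySem.Chars.count cs [c] > 1
      · rw [if_pos ⟨hp, hnm⟩]
        have hstate : PySem.Set.add ((PySem.Set.ofList P).filter (fun c => decide (PySem.Chars.count cs [c] > 1))) c
            = (PySem.Set.ofList (P ++ [c])).filter (fun c => decide (PySem.Chars.count cs [c] > 1)) := by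
          rw [pv_add_not_mem _ _ hnm, pv_ofList_snoc, pv_add_not_mem _ _ hm, List.filter_append]
          simp [hp]
        simp only [hstate]
        rw [ih (R ++ [((PySem.List.enumerate cs).filter (fun p => p.2 == c)).map (fun p => p.1)]) (P ++ [c])]
        rw [pv_ofList_snoc, pv_add_not_mem _ _ hm, pv_update_drop,
            List.filter_cons, if_pos (by simpa using hp), List.map_cons]
        simp [pvPos]
      · rw [if_neg (by simp [hp])]
        have hstate : (PySem.Set.ofList P).filter (fun c => decide (PySem.Chars.count cs [c] > 1))
            = (PySem.Set.ofList (P ++ [c])).filter (fun c => decide (PySem.Chars.count cs [c] > 1)) := by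
          rw [pv_ofList_snoc, pv_add_not_mem _ _ hm, List.filter_append]
          simp [hp]
        rw [hstate, ih R (P ++ [c]), pv_ofList_snoc, pv_add_not_mem _ _ hm, pv_update_drop,
            List.filter_cons, if_neg (by simpa using hp)]
        simp

-- B's grouping dict: value for a letter = its positions list
theorem pv_B_getD (cs : List Char) (c : Char) :
    ((PySem.List.enumerate cs).foldl (fun d p => d.modify p.2 [] (fun v => v ++ [p.1]))
      PySem.Dict.empty).getD c [] = pvPos cs c := by
  have h := PySem.Dict.getD_foldl_modify_append
      ((PySem.List.enumerate cs).map (fun p => (p.2, p.1))) (PySem.Dict.empty (κ := Char) (ν := List Int)) c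
  rw [List.foldl_map] at h
  simp only [h]
  rw [List.filter_map]
  simp [pvPos, List.map_map, Function.comp_def]

-- B's grouping dict: keys = letters in first-occurrence order
theorem pv_B_keys (cs : List Char) :
    ((PySem.List.enumerate cs).foldl (fun d p => d.modify p.2 [] (fun v => v ++ [p.1]))
      PySem.Dict.empty).keys = PySem.Set.ofList cs := by
  have h := PySem.Dict.keys_foldl_modify_key (PySem.List.enumerate cs) (fun p => p.2) []
      (fun _ p => fun v => v ++ [p.1]) PySem.Dict.empty
  simp only [h, PySem.List.map_snd_enumerate]
  rw [PySem.Set.ofList_eq_foldl]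
  rfl

theorem pv_B_items (cs : List Char) :
    ((PySem.List.enumerate cs).foldl (fun d p => d.modify p.2 [] (fun v => v ++ [p.1]))
      PySem.Dict.empty).items = (PySem.Set.ofList cs).map (fun k => (k, pvPos cs k)) := by
  have hnd := PySem.Dict.nodup_keys_foldl_modify_key (PySem.List.enumerate cs) (fun p => p.2) []
      (fun _ p => fun v => v ++ [p.1]) PySem.Dict.empty (by simp [PySem.Dict.empty, PySem.Dict.keys])
  rw [PySem.Dict.items_eq_map_keys _ hnd [], pv_B_keys]
  exact List.map_congr_left (fun k _ => by rw [pv_B_getD])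

-- ===== VERDICT (by name: the statement is the Claim_ definition above) =====
theorem leer_palabra_repetida_spec : Claim_equal_leer_palabra_repetida := by
  intro palabra _
  unfold Spec_leer_palabra_repetida
  have hA : (leer_palabra_repetida palabra).1
      = ((PySem.Set.ofList palabra.toList).filter
          (fun c => decide (PySem.Chars.count palabra.toList [c] > 1))).map (pvPos palabra.toList) := by
    have h := pv_A_loop palabra.toList palabra.toList [] []
    have e0 : (PySem.Set.ofList ([] : List Char)) = ([] : List Char) := rfl
    rw [e0] at h
    simp only [List.filter_nil, List.length_nil, List.drop_zero, List.nil_append] at h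
    have e3 : PySem.Set.update ([] : PySem.Set Char) palabra.toList = PySem.Set.ofList palabra.toList :=
      (PySem.Set.ofList_eq_foldl _).symm
    rw [e3] at h
    unfold leer_palabra_repetida
    exact h
  have hB : (leer_palabra_repetida_alt palabra).1
      = ((PySem.Set.ofList palabra.toList).filter
          (fun c => decide (PySem.Chars.count palabra.toList [c] > 1))).map (pvPos palabra.toList) := by
    unfold leer_palabra_repetida_alt
    simp only [PySem.Dict.foldl_insert_getD_add_one_eq_counter, pv_B_items]
    rw [List.filter_map]
    simp only [List.map_map]
    congr 1
    · apply List.filter_congr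
      intro k _
      simp [Function.comp, PySem.Dict.getD_counter, pv_count_singleton]
  have h12 := hA.trans hB.symm
  have e1 : (leer_palabra_repetida palabra).2 = ((leer_palabra_repetida palabra).1.length : Int) := rfl
  have e2 : (leer_palabra_repetida_alt palabra).2 = ((leer_palabra_repetida_alt palabra).1.length : Int) := rfl
  exact Prod.ext h12 (by rw [e1, e2, h12])
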